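-- pv_equiv track=rewrite | github.com/Hk4Fun/algorithm_offer | campus_interview/2_扑克牌魔术.py | MiTest
-- ===== SOURCE A (Python) =====
-- from collections import deque
--
-- def MiTest(n):
--     if not n: return []
--     s = deque([i + 1 for i in range(n)])  # 手中牌堆
--     a = deque([])  # 桌子牌堆
--     for i in range(n):
--         a.appendleft(s.popleft())
--         if s: s.append(s.popleft())
--     s = [0] * n
--     for i, v in enumerate(a):
--         s[v - 1] = i + 1
--     return s
-- ===== SOURCE B (Python) =====
-- def MiTest(n):
--     if not n: return []
--     # Reconstruct the deal order round by round with slices instead of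
--     # simulating the deque card by card.
--     cur = list(range(1, n + 1))
--     order = []
--     while cur:
--         order.extend(cur[0::2])       # cards dealt in this pass
--         nxt = cur[1::2]               # cards moved under the pile
--         if len(cur) % 2 == 1 and nxt:
--             # the pass ended on a deal, so one more card is moved to the back
--             nxt = nxt[1:] + nxt[:1]
--         cur = nxt
--     res = [0] * n
--     for k, card in enumerate(order):
--         res[card - 1] = n - k         # first dealt card gets value n
--     return res
-- ===== Notes on version B (the rewrite author's own statement) =====
-- stated objective: alternative
-- what changed: B replaces A's card-by-card deque simulation (deal one, tuck one, n iterations) by a round-based reconstruction: each pass extracts the dealt cards with a step-2 slice cur[0::2] and keeps cur[1::2] (rotated once when the pass length is odd) as the next queue, then assigns value n-k to the k-th dealt card instead of enumerating the reversed table pile.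
import Mathlib
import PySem

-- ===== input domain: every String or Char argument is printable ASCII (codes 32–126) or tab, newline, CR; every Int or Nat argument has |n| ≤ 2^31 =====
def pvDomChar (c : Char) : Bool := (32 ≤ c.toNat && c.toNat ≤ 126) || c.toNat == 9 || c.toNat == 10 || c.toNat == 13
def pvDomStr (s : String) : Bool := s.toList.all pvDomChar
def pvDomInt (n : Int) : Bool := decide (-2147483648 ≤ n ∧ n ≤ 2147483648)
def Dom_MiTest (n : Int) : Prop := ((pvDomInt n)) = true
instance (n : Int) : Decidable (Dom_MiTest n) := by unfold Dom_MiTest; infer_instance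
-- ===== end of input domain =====

-- B replaces A's one-card-at-a-time deque simulation by a round-based
-- reconstruction of the deal order via step-2 slices (objective: alternative).

-- ===== PORT A =====
-- Port of A's deque loop body: s/a are deques (front = head); appendleft = cons.
-- popleft on an empty deque would raise, but s is provably nonempty for all n
-- iterations; the [] branch keeps the state unchanged and is unreachable.
def MiTest (n : Int) : List Int :=
  if n == 0 then []                                  -- `if not n: return []`
  else
    let s0 : List Int := (PySem.List.pyRange 0 n 1).map (fun i => i + 1)
    let p := (PySem.List.pyRange 0 n 1).foldl (fun (p : List Int × List Int) _ =>
      match p.1 with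
      | [] => p                                      -- unreachable (deque never empty here)
      | x :: s' =>
        let a' := x :: p.2                           -- a.appendleft(s.popleft())
        match s' with
        | [] => ([], a')                             -- `if s:` is false
        | y :: s'' => (s'' ++ [y], a')               -- s.append(s.popleft())
      ) (s0, [])
    (PySem.List.enumerate p.2).foldl                 -- for i, v in enumerate(a): s[v-1] = i+1
      (fun res iv => PySem.List.pySetD res (iv.2 - 1) (iv.1 + 1))
      (List.replicate n.toNat 0)                     -- [0] * n

-- ===== PORT B =====
-- Exact hand port of the full-range step-2 slice xs[0::2] (PySem.slice covers step 1 only).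
def pyEvens : List Int → List Int
  | [] => []
  | [x] => [x]
  | x :: _ :: l => x :: pyEvens l

-- xs[1::2] = (xs[1:])[0::2]; exact for step-2 slices starting at 1.
def pyOdds (l : List Int) : List Int := pyEvens l.tail

theorem length_pyEvens_le (l : List Int) : (pyEvens l).length ≤ l.length := by
  fun_induction pyEvens with
  | case1 => simp
  | case2 => simp
  | case3 x y l ih => simp [pyEvens]; omega

theorem length_pyOdds_lt (l : List Int) (h : l ≠ []) : (pyOdds l).length < l.length := by
  cases l with
  | nil => simp at h
  | cons a t =>
    have := length_pyEvens_le t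
    simp [pyOdds]; omega

-- `while cur:` loop of B: collect this pass's deals, rotate the moved pile when
-- the pass length is odd.
def bRounds (cur : List Int) : List Int :=
  if h : cur = [] then []
  else
    let dealt := pyEvens cur                          -- cur[0::2]
    let nxt0 := pyOdds cur                            -- cur[1::2]
    let nxt := if cur.length % 2 == 1 && !(nxt0 == []) then
                 PySem.List.slice nxt0 (some 1) none ++ PySem.List.slice nxt0 none (some 1)
               else nxt0                              -- nxt[1:] + nxt[:1]
    dealt ++ bRounds nxt
termination_by cur.length
decreasing_by
  have hlt := length_pyOdds_lt cur h
  split <;> simp_all [PySem.List.slice_from_one, PySem.List.slice_to]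
  omega

def MiTest_alt (n : Int) : List Int :=
  if n == 0 then []
  else
    let cur := PySem.List.pyRange 1 (n + 1) 1         -- list(range(1, n+1))
    let order := bRounds cur
    (PySem.List.enumerate order).foldl                -- for k, card in enumerate(order): res[card-1] = n-k
      (fun res kc => PySem.List.pySetD res (kc.2 - 1) (n - kc.1))
      (List.replicate n.toNat 0)                      -- [0] * n

-- ===== PRECONDITION & SPEC =====
def Spec_MiTest (n : Int) (out : List Int) : Prop := out = MiTest_alt n
instance (n : Int) (out : List Int) : Decidable (Spec_MiTest n out) := by unfold Spec_MiTest; infer_instance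

-- ===== CLAIM (what is proved, stated in full; the proofs are below) =====
def Claim_equal_MiTest : Prop := ∀ (n : Int), Dom_MiTest n → Spec_MiTest n (MiTest n)

-- ===== LEMMAS AND PROOFS =====

-- rotate a queue left by one position
def rot (l : List Int) : List Int := l.drop 1 ++ l.take 1

theorem length_rot (l : List Int) : (rot l).length = l.length := by
  simp [rot]; omega

-- the deal order of A's simulation: deal the front card, move the next one under
def dealSeq : List Int → List Int
  | [] => []
  | x :: l => x :: dealSeq (rot l)
termination_by l => l.length
decreasing_by simp [length_rot]

-- queue at the start of the next slicing round
def nextQ (q : List Int) : List Int :=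
  if q.length % 2 = 1 then rot (pyOdds q) else pyOdds q

theorem pyEvens_cons (x : Int) (l : List Int) : pyEvens (x :: l) = x :: pyEvens l.tail := by
  cases l <;> simp [pyEvens]

theorem pyOdds_cons (x : Int) (l : List Int) : pyOdds (x :: l) = pyEvens l := by
  simp [pyOdds]

theorem pyEvens_append_singleton (l : List Int) (y : Int) :
    pyEvens (l ++ [y]) = pyEvens l ++ (if l.length % 2 = 0 then [y] else []) := by
  fun_induction pyEvens l with
  | case1 => simp [pyEvens]
  | case2 x => simp [pyEvens]
  | case3 x z l ih =>
    simp only [List.cons_append, pyEvens, ih, List.length_cons,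
      show ∀ m : Nat, (m + 1 + 1) % 2 = m % 2 from fun m => by omega]

theorem pyOdds_append_singleton (l : List Int) (y : Int) :
    pyOdds (l ++ [y]) = pyOdds l ++ (if l.length % 2 = 0 then [] else [y]) := by
  cases l with
  | nil => simp [pyOdds, pyEvens]
  | cons a t =>
    simp only [List.cons_append, pyOdds_cons, pyEvens_append_singleton, List.length_cons]
    have h : (t.length + 1) % 2 = 0 ↔ ¬ (t.length % 2 = 0) := by omega
    by_cases ht : t.length % 2 = 0 <;> simp [ht, h]

-- the key round lemma: one slicing round of B agrees with A's card-by-card deal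
theorem dealSeq_round (q : List Int) : dealSeq q = pyEvens q ++ dealSeq (nextQ q) := by
  induction hn : q.length using Nat.strong_induction_on generalizing q with
  | _ n ih =>
  match q with
  | [] => simp [dealSeq, pyEvens, pyOdds, nextQ, rot]
  | [x] => simp [dealSeq, pyEvens, pyOdds, nextQ, rot]
  | x :: y :: rest =>
    have hrot : rot (y :: rest) = rest ++ [y] := by simp [rot]
    have hlen : (rest ++ [y]).length < n := by simp at hn ⊢; omega
    have ihr := ih _ hlen (rest ++ [y]) rfl
    have hds : dealSeq (x :: y :: rest) = x :: dealSeq (rest ++ [y]) := by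
      rw [dealSeq, hrot]
    by_cases hp : rest.length % 2 = 0
    · -- q has even length: this round moves y under last; it is dealt next round first
      have hq : nextQ (x :: y :: rest) = y :: pyOdds rest := by
        rw [nextQ, if_neg (by simp; omega), pyOdds_cons, pyEvens_cons, pyOdds]
      have hnx : nextQ (rest ++ [y]) = rot (pyOdds rest) := by
        rw [nextQ, if_pos (by simp; omega), pyOdds_append_singleton, if_pos hp,
          List.append_nil]
      rw [hds, ihr, hnx, hq, pyEvens_append_singleton, if_pos hp,
        show dealSeq (y :: pyOdds rest) = y :: dealSeq (rot (pyOdds rest)) from by rw [dealSeq]]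
      simp [pyEvens]
    · -- q has odd length: the round ends on a deal, so the moved pile is rotated
      have hq : nextQ (x :: y :: rest) = pyOdds rest ++ [y] := by
        rw [nextQ, if_pos (by simp; omega), pyOdds_cons, pyEvens_cons]
        simp [rot, pyOdds]
      have hnx : nextQ (rest ++ [y]) = pyOdds rest ++ [y] := by
        rw [nextQ, if_neg (by simp; omega), pyOdds_append_singleton, if_neg hp]
      rw [hds, ihr, hnx, hq, pyEvens_append_singleton, if_neg hp]
      simp [pyEvens]

theorem bRounds_eq_dealSeq (q : List Int) : bRounds q = dealSeq q := by
  induction hn : q.length using Nat.strong_induction_on generalizing q with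
  | _ n ih =>
  by_cases h : q = []
  · subst h; simp [bRounds, dealSeq]
  · rw [bRounds]
    simp only [h, dite_false]
    have hnxt : (if q.length % 2 == 1 && !(pyOdds q == []) then
                 PySem.List.slice (pyOdds q) (some 1) none ++ PySem.List.slice (pyOdds q) none (some 1)
               else pyOdds q) = nextQ q := by
      rw [PySem.List.slice_from_one, PySem.List.slice_to _ (by norm_num)]
      by_cases ho : pyOdds q = []
      · rw [nextQ]; simp [ho, rot]
      · by_cases hp : q.length % 2 = 1
        · rw [nextQ, if_pos hp]; simp [hp, ho, rot, List.drop_one]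
        · rw [nextQ, if_neg hp]; simp [hp]
    have hlt : (nextQ q).length < n := by
      have h1 := length_pyOdds_lt q h
      have h2 : (rot (pyOdds q)).length = (pyOdds q).length := length_rot _
      rw [nextQ]
      subst hn
      split <;> omega
    rw [hnxt, ih _ hlt _ rfl, ← dealSeq_round]

theorem dealSeq_perm (q : List Int) : List.Perm (dealSeq q) q := by
  induction hn : q.length using Nat.strong_induction_on generalizing q with
  | _ n ih =>
  match q, hn with
  | [], _ => simp [dealSeq]
  | x :: l, hn =>
    have hr : List.Perm (rot l) l := by
      rw [rot]
      conv_rhs => rw [← List.take_append_drop 1 l]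
      exact List.perm_append_comm
    have hl : (rot l).length < n := by simp [length_rot] at hn ⊢; omega
    have := ih _ hl (rot l) rfl
    rw [dealSeq]
    exact List.Perm.cons x (this.trans hr)

-- A's simulation loop produces ([], reverse (dealSeq s) ++ a) after s.length steps
theorem loopA (f : List Int × List Int → Int → List Int × List Int)
    (hf : ∀ x (s' a : List Int) i, f (x :: s', a) i = (rot s', x :: a))
    (L : List Int) (s a : List Int) (h : L.length = s.length) :
    L.foldl f (s, a) = ([], (dealSeq s).reverse ++ a) := by
  induction L generalizing s a with
  | nil =>
    have : s = [] := by cases s <;> simp_all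
    subst this; simp [dealSeq]
  | cons i L ih =>
    cases s with
    | nil => simp at h
    | cons x s' =>
      have hs' : L.length = (rot s').length := by simp [length_rot] at h ⊢; omega
      rw [List.foldl_cons, hf, ih _ _ hs', dealSeq]
      simp

-- moving one assignment past later assignments at distinct nonnegative indices
theorem pySetD_comm (r : List Int) (i j v w : Int) (hi : 0 ≤ i) (hj : 0 ≤ j) (hij : i ≠ j) :
    PySem.List.pySetD (PySem.List.pySetD r i v) j w
      = PySem.List.pySetD (PySem.List.pySetD r j w) i v := by
  rw [PySem.List.pySetD_of_nonneg _ _ hi, PySem.List.pySetD_of_nonneg _ _ hj,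
      PySem.List.pySetD_of_nonneg _ _ hj, PySem.List.pySetD_of_nonneg _ _ hi]
  apply List.set_comm
  omega

theorem foldl_pySetD_push (P : List (Int × Int)) (p : Int × Int) (init : List Int)
    (hp : 0 ≤ p.1) (hP : ∀ q ∈ P, 0 ≤ q.1 ∧ q.1 ≠ p.1) :
    P.foldl (fun r q => PySem.List.pySetD r q.1 q.2) (PySem.List.pySetD init p.1 p.2)
      = PySem.List.pySetD (P.foldl (fun r q => PySem.List.pySetD r q.1 q.2) init) p.1 p.2 := by
  induction P generalizing init with
  | nil => simp
  | cons q P ih =>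
    have hq := hP q (by simp)
    simp only [List.foldl_cons]
    rw [pySetD_comm init p.1 q.1 p.2 q.2 hp hq.1 (fun h => hq.2 h.symm)]
    exact ih _ (fun q hq => hP q (by simp [hq]))

theorem foldl_pySetD_reverse (P : List (Int × Int)) (init : List Int)
    (h0 : ∀ q ∈ P, 0 ≤ q.1) (hnd : (P.map Prod.fst).Nodup) :
    P.reverse.foldl (fun r q => PySem.List.pySetD r q.1 q.2) init
      = P.foldl (fun r q => PySem.List.pySetD r q.1 q.2) init := by
  induction P generalizing init with
  | nil => simp
  | cons p P ih =>
    simp only [List.reverse_cons, List.foldl_append, List.foldl_cons, List.foldl_nil]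
    simp only [List.map_cons, List.nodup_cons] at hnd
    rw [ih init (fun q hq => h0 q (by simp [hq])) hnd.2]
    rw [foldl_pySetD_push P p init (h0 p (by simp))
      (fun q hq => ⟨h0 q (by simp [hq]), fun hc => hnd.1 (hc ▸ List.mem_map_of_mem hq)⟩)]

-- the two enumerate-folds process the same assignment pairs, one list reversed
theorem pairs_reverse (ord : List Int) (n : Int) (hn : (ord.length : Int) = n) :
    (PySem.List.enumerate ord.reverse).map (fun iv => (iv.2 - 1, iv.1 + 1))
      = ((PySem.List.enumerate ord).map (fun kv => (kv.2 - 1, n - kv.1))).reverse := by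
  apply List.ext_getElem
  · simp [PySem.List.length_enumerate]
  · intro k h1 h2
    have hk : k < ord.length := by simpa [PySem.List.length_enumerate] using h1
    have hk' : ord.length - 1 - k < ord.length := by omega
    simp only [List.getElem_map, PySem.List.getElem_enumerate, List.getElem_reverse,
      List.length_map, PySem.List.length_enumerate, Prod.mk.injEq]
    refine ⟨by trivial, ?_⟩
    push_cast
    omega

-- ===== VERDICT (by name: the statement is the Claim_ definition above) =====
theorem MiTest_spec : Claim_equal_MiTest := by
  intro n _
  unfold Spec_MiTest MiTest MiTest_alt
  by_cases h0 : n = 0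
  · simp [h0]
  · simp only [beq_iff_eq, if_neg h0]
    by_cases hneg : n < 0
    · have h1 : PySem.List.pyRange 0 n 1 = [] := PySem.List.pyRange_one_eq_nil (by omega)
      have h2 : PySem.List.pyRange 1 (n + 1) 1 = [] := PySem.List.pyRange_one_eq_nil (by omega)
      have h3 : n.toNat = 0 := by omega
      simp [h1, h2, h3, bRounds, PySem.List.enumerate]
    · -- positive n
      have hpos : 0 < n := by omega
      -- the two starting hands coincide
      have hsq : (PySem.List.pyRange 0 n 1).map (fun i => i + 1) = PySem.List.pyRange 1 (n + 1) 1 := by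
        rw [PySem.List.pyRange_one, PySem.List.pyRange_one, List.map_map]
        have : (n - 0).toNat = (n + 1 - 1).toNat := by omega
        rw [this]
        apply List.map_congr_left
        intro k _
        simp
        omega
      set q : List Int := PySem.List.pyRange 1 (n + 1) 1 with hq
      have hlenq : (q.length : Int) = n := by
        simp [hq, PySem.List.length_pyRange_one]
        omega
      have hlenL : (PySem.List.pyRange 0 n 1).length = ((PySem.List.pyRange 0 n 1).map (fun i => i + 1)).length := by simp
      rw [hsq, loopA _ (fun x s' a i => by cases s' <;> simp [rot]) _ _ _
        (by rw [hlenL, hsq])]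
      simp only [List.append_nil]
      rw [bRounds_eq_dealSeq]
      set ord : List Int := dealSeq q with hord
      have hperm : List.Perm ord q := dealSeq_perm q
      have hordlen : (ord.length : Int) = n := by rw [hperm.length_eq]; exact hlenq
      -- turn both folds into folds over explicit (index, value) pair lists
      have fa : (PySem.List.enumerate ord.reverse).foldl
          (fun res iv => PySem.List.pySetD res (iv.2 - 1) (iv.1 + 1)) (List.replicate n.toNat 0)
          = ((PySem.List.enumerate ord.reverse).map (fun iv => (iv.2 - 1, iv.1 + 1))).foldl
            (fun r p => PySem.List.pySetD r p.1 p.2) (List.replicate n.toNat 0) := by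
        rw [List.foldl_map]
      have fb : (PySem.List.enumerate ord).foldl
          (fun res kc => PySem.List.pySetD res (kc.2 - 1) (n - kc.1)) (List.replicate n.toNat 0)
          = ((PySem.List.enumerate ord).map (fun kv => (kv.2 - 1, n - kv.1))).foldl
            (fun r p => PySem.List.pySetD r p.1 p.2) (List.replicate n.toNat 0) := by
        rw [List.foldl_map]
      rw [fa, fb, pairs_reverse ord n hordlen]
      apply foldl_pySetD_reverse
      · intro p hp
        simp only [List.mem_map] at hp
        obtain ⟨kv, hkv, rfl⟩ := hp
        have hv : kv.2 ∈ ord := by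
          have := (PySem.List.mem_enumerate_iff _ _ _).mp hkv
          obtain ⟨k, hk, rfl⟩ := this
          exact List.getElem_mem _
        have : kv.2 ∈ q := hperm.mem_iff.mp hv
        rw [hq, PySem.List.mem_pyRange_one] at this
        simp; omega
      · -- indices v-1 are pairwise distinct: ord is a permutation of range(1, n+1)
        have hnd : ord.Nodup := hperm.nodup_iff.mpr (hq ▸ PySem.List.nodup_pyRange_one 1 (n+1))
        have : ((PySem.List.enumerate ord).map (fun kv => (kv.2 - 1, n - kv.1))).map Prod.fst
            = ord.map (fun v => v - 1) := by
          rw [List.map_map]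
          have hsnd := PySem.List.map_snd_enumerate ord (0 : Int)
          calc (PySem.List.enumerate ord).map (Prod.fst ∘ fun kv => (kv.2 - 1, n - kv.1))
              = ((PySem.List.enumerate ord).map (·.2)).map (fun v => v - 1) := by
                rw [List.map_map]; rfl
            _ = ord.map (fun v => v - 1) := by rw [hsnd]
        rw [this]
        exact List.Nodup.map (fun a b h => by omega) hnd
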